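-- pv_equiv track=rewrite | github.com/trya2l/tic-tac-toe-opencv | src/main.py | value_to_grid
-- ===== SOURCE A (Python) =====
-- import math
--
-- def value_to_grid(value):
--     """
--     It finds the two numbers that are closest to the square root of the input value, and returns them in
--     ascending order
--
--     :param value: the number of items to be displayed in the grid
--     :return: the two numbers that are closest to the square root of the input value.
--     """
--     divisors = []
--     for i in range(1, int(math.sqrt(value))+1):
--         if value % i == 0:
--             divisors.append(i)
--             if i != value // i:
--                 divisors.append(value // i)
--     divisors.sort()
--     mid = len(divisors) // 2
--     return divisors[mid]
-- ===== SOURCE B (Python) =====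
-- import math
--
-- def value_to_grid(value):
--     # Scan candidate divisors downward from int(sqrt(value)); the first hit i is the
--     # largest divisor <= sqrt(value), so value // i is the "middle" divisor A returns.
--     for i in range(int(math.sqrt(value)), 0, -1):
--         if value % i == 0:
--             return value // i
-- ===== Notes on version B (the rewrite author's own statement) =====
-- stated objective: simpler
-- what changed: Instead of collecting all divisors into a list, sorting it and indexing the middle, B scans candidates downward from int(sqrt(value)) and returns value // i at the first divisor hit, maintaining no list and doing no sort.
-- outside the precondition, e.g. on value_to_grid(0): A raises IndexError, B returns None; on value_to_grid(-5): A raises ValueError, B raises ValueError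
import Mathlib
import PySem

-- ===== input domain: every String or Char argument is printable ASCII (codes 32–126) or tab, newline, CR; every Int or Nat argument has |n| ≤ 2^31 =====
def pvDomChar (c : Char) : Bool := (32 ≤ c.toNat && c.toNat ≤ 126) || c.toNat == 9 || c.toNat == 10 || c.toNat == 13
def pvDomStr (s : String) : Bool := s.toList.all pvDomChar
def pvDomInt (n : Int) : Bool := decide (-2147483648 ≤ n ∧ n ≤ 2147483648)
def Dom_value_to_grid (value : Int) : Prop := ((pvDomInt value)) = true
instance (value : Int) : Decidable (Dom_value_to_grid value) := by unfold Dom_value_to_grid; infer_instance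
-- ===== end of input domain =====

-- B replaces A's collect-all-divisors/sort/index-the-middle by a single downward scan from
-- int(sqrt(value)) returning value // i at the first divisor hit (objective: simpler).

-- ===== PORT A =====
-- int(math.sqrt(value)) is Nat.sqrt value.toNat: exact for 0 ≤ value ≤ 2^31 (double sqrt is
-- correctly rounded there); for value < 0 Python's math.sqrt raises ValueError (outside Pre_).
def value_to_grid (value : Int) : Int :=
  let r : Nat := Nat.sqrt value.toNat
  let divisors : List Int :=
    (PySem.List.pyRange 1 ((r : Int) + 1)).foldl
      (fun ds i =>
        if PySem.Int.mod value i = 0 then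
          ds ++ (if i ≠ PySem.Int.floordiv value i
                 then [i, PySem.Int.floordiv value i] else [i])
        else ds) []
  let ds := PySem.List.sorted divisors (fun x => x)
  let mid : Int := PySem.Int.floordiv ((ds.length : Int)) 2
  -- divisors[mid]: IndexError only when divisors = [] (value = 0, outside Pre_); .getD 0 there
  (PySem.List.pyGet? ds mid).getD 0

-- ===== PORT B =====
-- for i in range(r, 0, -1): the argument j+1 is the current i, recursing to j; at 0 the
-- Python loop falls through returning None, which only happens for value = 0 (outside Pre_).
def vgAltGo (value : Int) : Nat → Int
  | 0 => 0
  | j + 1 =>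
    if PySem.Int.mod value ((j : Int) + 1) = 0
    then PySem.Int.floordiv value ((j : Int) + 1)
    else vgAltGo value j

def value_to_grid_alt (value : Int) : Int :=
  vgAltGo value (Nat.sqrt value.toNat)

-- ===== PRECONDITION & SPEC =====
-- Pre_ excludes value ≤ 0, where A raises: ValueError from math.sqrt for value < 0,
-- IndexError from indexing the empty divisor list for value = 0.
def Pre_value_to_grid (value : Int) : Prop := 1 ≤ value
instance (value : Int) : Decidable (Pre_value_to_grid value) := by unfold Pre_value_to_grid; infer_instance
def pvWitness_value_to_grid : Int := 12
def Spec_value_to_grid (value : Int) (out : Int) : Prop := out = value_to_grid_alt value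
instance (value : Int) (out : Int) : Decidable (Spec_value_to_grid value out) := by unfold Spec_value_to_grid; infer_instance

-- ===== CLAIM (what is proved, stated in full; the proofs are below) =====
def Claim_equal_value_to_grid : Prop := ∀ (value : Int), Dom_value_to_grid value → Pre_value_to_grid value → Spec_value_to_grid value (value_to_grid value)

-- ===== LEMMAS AND PROOFS =====

-- Nat-level skeleton of A's divisor list: the ascending small divisors 1..r of n,
-- the matching large divisors in ascending order, and their concatenation.
def vgSmalls (n r : Nat) : List Nat := (List.range' 1 r).filter (fun i => decide (n % i = 0))
def vgBigs (n r : Nat) : List Nat :=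
  (((vgSmalls n r).filter (fun i => decide (i ≠ n / i))).reverse).map (fun i => n / i)
def vgTarget (n r : Nat) : List Nat := vgSmalls n r ++ vgBigs n r

lemma vgSmalls_mem {n r i : Nat} (h : i ∈ vgSmalls n r) :
    1 ≤ i ∧ i ≤ r ∧ i ∣ n := by
  unfold vgSmalls at h
  simp [List.mem_filter, List.mem_range'_1] at h
  exact ⟨h.1.1, by omega, Nat.dvd_of_mod_eq_zero h.2⟩

lemma vgSmalls_pairwise (n r : Nat) : (vgSmalls n r).Pairwise (· < ·) :=
  List.Pairwise.filter _ (List.pairwise_lt_range' _)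

lemma vgSmalls_ne_nil (n r : Nat) (hr : 1 ≤ r) : vgSmalls n r ≠ [] := by
  have : 1 ∈ vgSmalls n r := by
    rw [vgSmalls, List.mem_filter, List.mem_range'_1]
    simp; omega
  exact List.ne_nil_of_mem this

lemma vgSmalls_succ (n j : Nat) :
    vgSmalls n (j + 1) =
      vgSmalls n j ++ (if n % (j + 1) = 0 then [j + 1] else []) := by
  unfold vgSmalls
  rw [List.range'_1_concat, List.filter_append]
  congr 1
  by_cases h : n % (j + 1) = 0 <;> simp [h, Nat.add_comm 1 j]

-- the Int-level divisors list A builds is the cast of a Nat-level flatMap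
lemma vg_divisors_eq (n r : Nat) :
    ((PySem.List.pyRange 1 ((r : Int) + 1)).foldl
      (fun ds i =>
        if PySem.Int.mod (n : Int) i = 0 then
          ds ++ (if i ≠ PySem.Int.floordiv (n : Int) i
                 then [i, PySem.Int.floordiv (n : Int) i] else [i])
        else ds) [])
    = ((List.range' 1 r).flatMap
        (fun i => if n % i = 0 then (if i ≠ n / i then [i, n / i] else [i]) else [])).map
        (fun i : Nat => (i : Int)) := by
  have hR : PySem.List.pyRange 1 ((r : Int) + 1) = (List.range' 1 r).map (fun i : Nat => (i:Int)) := by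
    induction r with
    | zero => rfl
    | succ j ih =>
      rw [PySem.List.pyRange_one_succ_right (by omega), List.range'_1_concat]
      push_cast at *
      rw [ih]
      simp [Nat.add_comm 1 j]
  rw [hR, List.foldl_map]
  have hstep : (fun (ds : List Int) (i : Nat) =>
        if PySem.Int.mod (n : Int) (i : Int) = 0 then
          ds ++ (if (i : Int) ≠ PySem.Int.floordiv (n : Int) (i : Int)
                 then [(i : Int), PySem.Int.floordiv (n : Int) (i : Int)] else [(i : Int)])
        else ds)
      = (fun ds i => ds ++
          ((if n % i = 0 then (if i ≠ n / i then [i, n / i] else [i]) else []).map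
            (fun i : Nat => (i : Int)))) := by
    funext ds i
    rw [PySem.Int.mod_natCast, PySem.Int.floordiv_natCast]
    by_cases h1 : n % i = 0
    · have h1' : ((n % i : Nat) : Int) = 0 := by exact_mod_cast h1
      rw [if_pos h1', if_pos h1]
      by_cases h2 : i = n / i
      · rw [if_neg (by exact_mod_cast not_not.mpr h2), if_neg (not_not.mpr h2)]; simp
      · rw [if_pos (by exact_mod_cast h2), if_pos h2]; simp
    · rw [if_neg (by exact_mod_cast h1), if_neg h1]; simp
  rw [hstep, PySem.List.foldl_append_eq_flatMap, List.map_flatMap]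
  rfl

lemma vg_flatMap_filter {α β : Type} (p : α → Bool) (g : α → List β) (l : List α) :
    l.flatMap (fun i => if p i then g i else []) = (l.filter p).flatMap g := by
  induction l with
  | nil => rfl
  | cons a l ih =>
    by_cases h : p a <;> simp [List.flatMap_cons, h, ih]

lemma vg_flatMap_perm (n : Nat) (S : List Nat) :
    (S ++ (S.filter (fun i => decide (i ≠ n / i))).map (fun i => n / i)).Perm
      (S.flatMap (fun i => if i ≠ n / i then [i, n / i] else [i])) := by
  induction S with
  | nil => simp
  | cons a S ih =>
    simp only [List.flatMap_cons, List.filter_cons, List.cons_append]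
    by_cases h : a = n / a
    · rw [if_neg (fun hh : a ≠ n / a => hh h),
          if_neg (by simp only [decide_eq_true_eq]; exact fun hh => hh h)]
      exact List.Perm.cons a ih
    · rw [if_pos h, if_pos (by simp only [decide_eq_true_eq]; exact h),
          List.map_cons, List.cons_append]
      refine List.Perm.cons a (List.Perm.trans ?_ (List.Perm.append_left [n / a] ih))
      exact List.perm_middle
  
lemma vg_perm (n r : Nat) :
    (vgTarget n r).Perm
      ((List.range' 1 r).flatMap
        (fun i => if n % i = 0 then (if i ≠ n / i then [i, n / i] else [i]) else [])) := by
  rw [show (fun i => if n % i = 0 then (if i ≠ n / i then [i, n / i] else [i]) else [])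
      = (fun i => if (decide (n % i = 0) : Bool) then (if i ≠ n / i then [i, n / i] else [i]) else []) by
      funext i; by_cases h : n % i = 0 <;> simp [h]]
  rw [vg_flatMap_filter]
  have h1 : (vgTarget n r).Perm
      (vgSmalls n r ++ ((vgSmalls n r).filter (fun i => decide (i ≠ n / i))).map (fun i => n / i)) :=
    List.Perm.append_left _ (List.Perm.map _ (List.reverse_perm _))
  exact h1.trans (vg_flatMap_perm n (vgSmalls n r))

lemma vg_div_lt {n a b : Nat} (hn : 1 ≤ n) (ha : a ∣ n) (hb : b ∣ n)
    (ha0 : 1 ≤ a) (hab : a < b) : n / b < n / a := by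
  have hle : n / b ≤ n / a := Nat.div_le_div_left (Nat.le_of_lt hab) ha0
  rcases Nat.lt_or_ge (n / b) (n / a) with h | h
  · exact h
  · exfalso
    have heq : n / b = n / a := Nat.le_antisymm hle h
    have h1 : n / a * a = n := Nat.div_mul_cancel ha
    have h2 : n / b * b = n := Nat.div_mul_cancel hb
    have hpos : 0 < n / a := Nat.div_pos (Nat.le_of_dvd (by omega) ha) (by omega)
    rw [heq] at h2
    nlinarith

lemma vg_big_gt {n i : Nat} (hn : 1 ≤ n) (hi : i ∣ n) (hi0 : 1 ≤ i)
    (hir : i ≤ Nat.sqrt n) (hne : i ≠ n / i) : Nat.sqrt n < n / i := by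
  set r := Nat.sqrt n with hr
  have hrr : r * r ≤ n := Nat.sqrt_le n
  have hr0 : 1 ≤ r := by
    have := Nat.sqrt_pos.mpr (show 0 < n by omega)
    omega
  have h1 : r ≤ n / i := by
    calc r ≤ n / r := (Nat.le_div_iff_mul_le (by omega)).mpr hrr
    _ ≤ n / i := Nat.div_le_div_left hir (by omega)
  rcases Nat.lt_or_ge r (n / i) with h | h
  · exact h
  · exfalso
    have heq : n / i = r := by omega
    have h2 : n / i * i = n := Nat.div_mul_cancel hi
    rw [heq] at h2
    have hri : r ≤ i := by nlinarith
    exact hne (by omega)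

lemma vg_filter_mem {n r i : Nat}
    (h : i ∈ ((vgSmalls n r).filter (fun i => decide (i ≠ n / i))).reverse) :
    1 ≤ i ∧ i ≤ r ∧ i ∣ n ∧ i ≠ n / i := by
  rw [List.mem_reverse, List.mem_filter] at h
  obtain ⟨h1, h2⟩ := h
  obtain ⟨a, b, c⟩ := vgSmalls_mem h1
  exact ⟨a, b, c, by simpa using h2⟩

lemma vg_pairwise (n : Nat) (hn : 1 ≤ n) :
    (vgTarget n (Nat.sqrt n)).Pairwise (· < ·) := by
  rw [vgTarget, List.pairwise_append]
  refine ⟨vgSmalls_pairwise n _, ?_, ?_⟩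
  · rw [vgBigs, List.pairwise_map]
    refine List.Pairwise.imp_of_mem ?_
      (List.pairwise_reverse.mpr (List.Pairwise.filter _ (vgSmalls_pairwise n _)))
    intro a b ha hb hab
    obtain ⟨ha1, _, ha3, _⟩ := vg_filter_mem ha
    obtain ⟨hb1, _, hb3, _⟩ := vg_filter_mem hb
    exact vg_div_lt hn hb3 ha3 hb1 hab
  · intro a ha b hb
    rw [vgBigs, List.mem_map] at hb
    obtain ⟨i, hi, rfl⟩ := hb
    obtain ⟨hi1, hi2, hi3, hi4⟩ := vg_filter_mem hi
    obtain ⟨_, ha2, _⟩ := vgSmalls_mem ha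
    exact Nat.lt_of_le_of_lt ha2 (vg_big_gt hn hi3 hi1 hi2 hi4)

-- sorting A's divisor list yields exactly vgTarget (cast to Int)
lemma vg_sorted_eq (n : Nat) (hn : 1 ≤ n) :
    PySem.List.sorted
      (((List.range' 1 (Nat.sqrt n)).flatMap
        (fun i => if n % i = 0 then (if i ≠ n / i then [i, n / i] else [i]) else [])).map
        (fun i : Nat => (i : Int))) (fun x => x)
    = (vgTarget n (Nat.sqrt n)).map (fun i : Nat => (i : Int)) := by
  refine PySem.List.sorted_eq_of_perm_of_pairwise_lt _ _ _
    (List.Perm.map _ (vg_perm n (Nat.sqrt n))) ?_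
  rw [List.pairwise_map]
  exact (vg_pairwise n hn).imp (fun h => by exact_mod_cast h)

lemma vg_filter_eq (n r : Nat) (_hn : 1 ≤ n) (hr : r = Nat.sqrt n) (hne : n ≠ r * r) :
    (vgSmalls n r).filter (fun i => decide (i ≠ n / i)) = vgSmalls n r := by
  rw [List.filter_eq_self]
  intro i hi
  obtain ⟨h1, h2, h3⟩ := vgSmalls_mem hi
  simp only [decide_eq_true_eq]
  intro hii
  have : i * i = n := by
    have := Nat.mul_div_cancel' h3
    rw [← hii] at this; exact this
  apply hne
  rw [hr, ← this, Nat.sqrt_eq i]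

-- the middle of the sorted divisor list is n / (the largest divisor ≤ √n)
lemma vg_middle (n : Nat) (hn : 1 ≤ n) :
    (vgTarget n (Nat.sqrt n))[(vgTarget n (Nat.sqrt n)).length / 2]? =
      ((vgSmalls n (Nat.sqrt n)).getLast?).map (fun x => n / x) := by
  obtain ⟨r, hr⟩ : ∃ r, Nat.sqrt n = r := ⟨_, rfl⟩
  rw [hr]
  have hr1 : 1 ≤ r := by
    have := Nat.sqrt_pos.mpr (show 0 < n by omega); omega
  have hS : vgSmalls n r ≠ [] := vgSmalls_ne_nil n r hr1
  have hk : 1 ≤ (vgSmalls n r).length := List.length_pos_iff.mpr hS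
  by_cases hsq : n = r * r
  · -- perfect square: S = S' ++ [r], bigs = map over S'.reverse
    obtain ⟨m, rfl⟩ : ∃ m, r = m + 1 := ⟨r - 1, by omega⟩
    have hrd : n % (m + 1) = 0 := by
      rw [hsq]; simp
    have hSsplit : vgSmalls n (m + 1) = vgSmalls n m ++ [m + 1] := by
      rw [vgSmalls_succ, if_pos hrd]
    have hS'small : ∀ i ∈ vgSmalls n m, i ≠ n / i := by
      intro i hi hii
      obtain ⟨h1, h2, h3⟩ := vgSmalls_mem hi
      have hieq : i * i = n := by
        have := Nat.mul_div_cancel' h3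
        rw [← hii] at this; exact this
      have : Nat.sqrt n = i := by rw [← hieq, Nat.sqrt_eq i]
      omega
    have hfilter : (vgSmalls n (m+1)).filter (fun i => decide (i ≠ n / i)) = vgSmalls n m := by
      rw [hSsplit, List.filter_append]
      have h2 : ¬ (m + 1 ≠ n / (m + 1)) := by
        rw [hsq, Nat.mul_div_cancel_left _ (by omega)]; simp
      have : List.filter (fun i => decide (i ≠ n / i)) [m+1] = [] := by
        simp only [List.filter_cons, List.filter_nil]
        rw [if_neg (by simpa using h2)]
      rw [this, List.append_nil, List.filter_eq_self.mpr]
      intro i hi; simpa using hS'small i hi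
    rw [vgTarget, vgBigs, hfilter, hSsplit]
    have hlen : ((vgSmalls n m ++ [m + 1]) ++ (vgSmalls n m).reverse.map (fun i => n / i)).length
        = 2 * (vgSmalls n m).length + 1 := by
      simp [List.length_append]; omega
    rw [hlen]
    have hmid : (2 * (vgSmalls n m).length + 1) / 2 = (vgSmalls n m).length := by omega
    rw [hmid]
    rw [List.getElem?_append_left (by simp)]
    rw [List.getElem?_append_right (by simp)]
    simp only [Nat.sub_self]
    rw [List.getLast?_concat]
    simp [hsq, Nat.mul_div_cancel_left _ (show 0 < m + 1 by omega)]
  · -- not a square: bigs = map over S.reverse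
    have hfilter := vg_filter_eq n r hn hr.symm hsq
    rw [vgTarget, vgBigs, hfilter]
    have hlen : (vgSmalls n r ++ (vgSmalls n r).reverse.map (fun i => n / i)).length
        = 2 * (vgSmalls n r).length := by simp; omega
    rw [hlen]
    have hmid : 2 * (vgSmalls n r).length / 2 = (vgSmalls n r).length := by omega
    rw [hmid]
    rw [List.getElem?_append_right (by omega)]
    simp only [Nat.sub_self]
    rw [← List.head?_eq_getElem?, List.head?_map, List.head?_reverse]

lemma vgAltGo_eq (n j x : Nat) (h : (vgSmalls n j).getLast? = some x) :
    vgAltGo (n : Int) j = ((n / x : Nat) : Int) := by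
  induction j with
  | zero => simp [vgSmalls] at h
  | succ j ih =>
    rw [vgAltGo]
    have hmod : PySem.Int.mod (n : Int) ((j : Int) + 1) = ((n % (j+1) : Nat) : Int) := by
      exact_mod_cast PySem.Int.mod_natCast n (j+1)
    have hdiv : PySem.Int.floordiv (n : Int) ((j : Int) + 1) = ((n / (j+1) : Nat) : Int) := by
      exact_mod_cast PySem.Int.floordiv_natCast n (j+1)
    rw [hmod, hdiv]
    rw [vgSmalls_succ] at h
    by_cases hc : n % (j + 1) = 0
    · rw [if_pos hc] at h
      rw [List.getLast?_concat] at h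
      rw [if_pos (by exact_mod_cast congrArg (Nat.cast : Nat → Int) hc)]
      cases h; rfl
    · rw [if_neg hc, List.append_nil] at h
      rw [if_neg (by exact_mod_cast hc), ih h]

-- ===== VERDICT (by name: the statement is the Claim_ definition above) =====
theorem value_to_grid_spec : Claim_equal_value_to_grid := by
  intro value _ hpre
  unfold Pre_value_to_grid at hpre
  unfold Spec_value_to_grid value_to_grid value_to_grid_alt
  obtain ⟨n, hv⟩ : ∃ n : Nat, value = (n : Int) := ⟨value.toNat, (Int.toNat_of_nonneg (by omega)).symm⟩
  subst hv
  have hn : 1 ≤ n := by exact_mod_cast hpre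
  simp only [Int.toNat_natCast]
  rw [vg_divisors_eq n (Nat.sqrt n), vg_sorted_eq n hn]
  have hS : vgSmalls n (Nat.sqrt n) ≠ [] :=
    vgSmalls_ne_nil n _ (by have := Nat.sqrt_pos.mpr (show 0 < n by omega); omega)
  obtain ⟨x, hx⟩ : ∃ x, (vgSmalls n (Nat.sqrt n)).getLast? = some x :=
    ⟨_, List.getLast?_eq_some_getLast hS⟩
  rw [vgAltGo_eq n _ x hx]
  rw [List.length_map]
  rw [show PySem.Int.floordiv (((vgTarget n (Nat.sqrt n)).length : Nat) : Int) 2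
        = (((vgTarget n (Nat.sqrt n)).length / 2 : Nat) : Int) from by
      exact_mod_cast PySem.Int.floordiv_natCast (vgTarget n (Nat.sqrt n)).length 2]
  rw [PySem.List.pyGet?_natCast, List.getElem?_map]
  rw [vg_middle n hn, hx]
  rfl
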